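-- pv_equiv track=rewrite | github.com/alexdenker/online_score_finetuning | old_code/train_optimal_control_full.py | _schedule_jump
-- ===== SOURCE A (Python) =====
-- def _schedule_jump(num_steps, travel_length, travel_repeat):
--     jumps = {}
--     for j in range(0, num_steps - travel_length, travel_length):
--         jumps[j] = travel_repeat - 1
--
--     t = num_steps
--     time_steps = []
--     while t >= 1:
--         t = t - 1
--         time_steps.append(t)
--         if jumps.get(t, 0) > 0:
--             jumps[t] = jumps[t] - 1
--             for _ in range(travel_length):
--                 t = t + 1
--                 time_steps.append(t)
--     time_steps.append(-1)
--     _check_times(time_steps, -1, num_steps)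
--
--     return time_steps
--
-- def _check_times(times, t_0, num_steps):
--     assert times[0] > times[1], (times[0], times[1])
--
--     assert times[-1] == -1, times[-1]
--
--     for t_last, t_cur in zip(times[:-1], times[1:]):
--         assert abs(t_last - t_cur) == 1, (t_last, t_cur)
--
--     for t in times:
--         assert t >= t_0, (t, t_0)
--         assert t <= num_steps, (t, num_steps)
-- ===== SOURCE B (Python) =====
-- def _schedule_jump(num_steps, travel_length, travel_repeat):
--     out = []
--     for i in range(num_steps - 1, -1, -1):
--         out.append(i)
--         if travel_length > 0 and i % travel_length == 0 and i < num_steps - travel_length: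
--             for _ in range(travel_repeat - 1):
--                 out.extend(range(i + 1, i + travel_length + 1))
--                 out.extend(range(i + travel_length - 1, i - 1, -1))
--     out.append(-1)
--     return out
-- ===== Notes on version B (the rewrite author's own statement) =====
-- stated objective: simpler
-- what changed: Replaces the mutable jump-count dict and jump-back pointer simulation by direct segment construction: a plain descending loop that, at each boundary index, emits travel_repeat-1 explicit up/down bounce segments as ranges.
import Mathlib
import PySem

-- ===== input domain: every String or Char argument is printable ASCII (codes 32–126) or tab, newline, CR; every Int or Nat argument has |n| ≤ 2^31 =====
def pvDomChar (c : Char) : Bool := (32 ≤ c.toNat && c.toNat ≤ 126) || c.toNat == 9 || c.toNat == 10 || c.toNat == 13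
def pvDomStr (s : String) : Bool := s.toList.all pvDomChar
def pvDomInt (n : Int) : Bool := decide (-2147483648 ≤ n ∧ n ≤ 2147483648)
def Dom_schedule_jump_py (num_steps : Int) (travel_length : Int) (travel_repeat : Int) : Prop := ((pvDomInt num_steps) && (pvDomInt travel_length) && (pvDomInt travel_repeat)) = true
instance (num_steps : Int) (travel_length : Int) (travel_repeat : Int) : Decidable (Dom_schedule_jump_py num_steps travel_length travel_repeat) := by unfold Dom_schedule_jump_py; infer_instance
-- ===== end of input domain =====

-- B replaces A's mutable jump-count dict and jump-back pointer simulation by a plain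
-- descending loop that emits each bounce as two explicit ranges (objective: simpler).

-- ===== PORT A =====
-- 'for _ in range(travel_length): t += 1; time_steps.append(t)'
def schedJumpInner (travel_length : Int) (t : Int) (acc : List Int) : Int × List Int :=
  (PySem.List.pyRange 0 travel_length 1).foldl
    (fun (s : Int × List Int) _ => (s.1 + 1, s.2 ++ [s.1 + 1])) (t, acc)

-- the 'while t >= 1' loop; fuel only makes it total (it is generous, never binding on Pre_)
def schedJumpLoop (travel_length : Int) : Nat → Int → PySem.Dict Int Int → List Int → List Int
  | 0, _, _, acc => acc
  | fuel + 1, t, jumps, acc =>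
    if 1 ≤ t then
      let t1 := t - 1
      let acc1 := acc ++ [t1]
      if 0 < jumps.getD t1 0 then
        let jumps1 := jumps.insert t1 (jumps.getD t1 0 - 1)
        let s := schedJumpInner travel_length t1 acc1
        schedJumpLoop travel_length fuel s.1 jumps1 s.2
      else
        schedJumpLoop travel_length fuel t1 jumps acc1
    else acc

-- _check_times only asserts (it returns nothing); on Pre_ every assertion holds, so the
-- port returns the list built before the call.
def schedule_jump_py (num_steps : Int) (travel_length : Int) (travel_repeat : Int) : List Int :=
  let jumps := (PySem.List.pyRange 0 (num_steps - travel_length) travel_length).foldl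
      (fun d j => d.insert j (travel_repeat - 1)) PySem.Dict.empty
  let fuel := num_steps.toNat * (1 + travel_length.toNat * (travel_repeat - 1).toNat) + 1
  schedJumpLoop travel_length fuel num_steps jumps [] ++ [-1]

-- ===== PORT B =====
-- 'for _ in range(travel_repeat - 1): out.extend(up range); out.extend(down range)'
def schedJumpBounces (travel_length : Int) (travel_repeat : Int) (i : Int) (out : List Int) : List Int :=
  (PySem.List.pyRange 0 (travel_repeat - 1) 1).foldl
    (fun out _ =>
      (out ++ PySem.List.pyRange (i + 1) (i + travel_length + 1) 1)
        ++ PySem.List.pyRange (i + travel_length - 1) (i - 1) (-1))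
    out

def schedule_jump_py_alt (num_steps : Int) (travel_length : Int) (travel_repeat : Int) : List Int :=
  ((PySem.List.pyRange (num_steps - 1) (-1) (-1)).foldl
    (fun out i =>
      let out := out ++ [i]
      if 0 < travel_length ∧ PySem.Int.mod i travel_length = 0 ∧ i < num_steps - travel_length
      then schedJumpBounces travel_length travel_repeat i out
      else out) []) ++ [-1]

-- ===== PRECONDITION & SPEC =====
-- Pre_ excludes exactly the inputs where A raises: num_steps ≤ 0 (times = [-1] and
-- _check_times hits IndexError on times[1]) and travel_length = 0 (range(0, _, 0) raises
-- ValueError).  On every other input A returns normally.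
def Pre_schedule_jump_py (num_steps : Int) (travel_length : Int) (travel_repeat : Int) : Prop :=
  1 ≤ num_steps ∧ travel_length ≠ 0
instance (num_steps : Int) (travel_length : Int) (travel_repeat : Int) : Decidable (Pre_schedule_jump_py num_steps travel_length travel_repeat) := by unfold Pre_schedule_jump_py; infer_instance
def pvWitness_schedule_jump_py : Int × Int × Int := (6, 2, 2)

def Spec_schedule_jump_py (num_steps : Int) (travel_length : Int) (travel_repeat : Int) (out : List Int) : Prop := out = schedule_jump_py_alt num_steps travel_length travel_repeat
instance (num_steps : Int) (travel_length : Int) (travel_repeat : Int) (out : List Int) : Decidable (Spec_schedule_jump_py num_steps travel_length travel_repeat out) := by unfold Spec_schedule_jump_py; infer_instance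

-- ===== CLAIM (what is proved, stated in full; the proofs are below) =====
def Claim_equal_schedule_jump_py : Prop := ∀ (num_steps : Int) (travel_length : Int) (travel_repeat : Int), Dom_schedule_jump_py num_steps travel_length travel_repeat → Pre_schedule_jump_py num_steps travel_length travel_repeat → Spec_schedule_jump_py num_steps travel_length travel_repeat (schedule_jump_py num_steps travel_length travel_repeat)

-- ===== LEMMAS AND PROOFS =====

-- spec-side segment vocabulary
def upSeg (tl i : Int) : List Int := PySem.List.pyRange (i + 1) (i + tl + 1) 1
def downSeg (tl i : Int) : List Int := PySem.List.pyRange (i + tl - 1) (i - 1) (-1)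
def bounceSeg (tl tr i : Int) : List Int :=
  (List.replicate (tr - 1).toNat (upSeg tl i ++ downSeg tl i)).flatten
def gSeg (n tl tr i : Int) : List Int :=
  i :: (if 0 < tl ∧ PySem.Int.mod i tl = 0 ∧ i < n - tl then bounceSeg tl tr i else [])
def seg (n tl tr t : Int) : List Int :=
  (PySem.List.pyRange (t - 1) (-1) (-1)).flatMap (gSeg n tl tr)

-- dict invariants for A's loop
def GInvD (n tl : Int) (d : PySem.Dict Int Int) : Prop :=
  ∀ x : Int, ¬ (0 < tl ∧ PySem.Int.mod x tl = 0 ∧ 0 ≤ x ∧ x < n - tl) → d.getD x 0 = 0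
def InvD (n tl tr : Int) (d : PySem.Dict Int Int) (t : Int) : Prop :=
  ∀ x : Int, 0 ≤ x → x < t →
    d.getD x 0 = if 0 < tl ∧ PySem.Int.mod x tl = 0 ∧ x < n - tl then tr - 1 else 0

-- B-side foldl shapes
lemma foldl_const_append {α : Type} (u v : List Int) :
    ∀ (l : List α) (out : List Int),
      l.foldl (fun out _ => (out ++ u) ++ v) out
        = out ++ (List.replicate l.length (u ++ v)).flatten := by
  intro l
  induction l with
  | nil => simp
  | cons a l ih =>
      intro out
      rw [List.foldl_cons, ih]
      simp [List.replicate_succ]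

lemma schedJumpBounces_eq (tl tr i : Int) (out : List Int) :
    schedJumpBounces tl tr i out = out ++ bounceSeg tl tr i := by
  unfold schedJumpBounces bounceSeg upSeg downSeg
  rw [foldl_const_append, PySem.List.length_pyRange_one]
  norm_num

lemma alt_fold (n tl tr : Int) :
    ∀ (l : List Int) (out : List Int),
      l.foldl (fun out i =>
        let out := out ++ [i]
        if 0 < tl ∧ PySem.Int.mod i tl = 0 ∧ i < n - tl
        then schedJumpBounces tl tr i out else out) out
      = out ++ l.flatMap (gSeg n tl tr) := by
  intro l
  induction l with
  | nil => simp
  | cons a l ih =>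
      intro out
      rw [List.foldl_cons]
      simp only
      by_cases h : 0 < tl ∧ PySem.Int.mod a tl = 0 ∧ a < n - tl
      · rw [if_pos h, schedJumpBounces_eq, ih, List.flatMap_cons]
        simp [gSeg, if_pos h]
      · rw [if_neg h, ih, List.flatMap_cons]
        simp [gSeg, if_neg h]

lemma alt_eq_seg (n tl tr : Int) :
    schedule_jump_py_alt n tl tr = seg n tl tr n ++ [-1] := by
  unfold schedule_jump_py_alt seg
  rw [alt_fold]
  simp

-- seg recursion
lemma seg_nonpos (n tl tr t : Int) (h : t ≤ 0) : seg n tl tr t = [] := by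
  unfold seg
  rw [PySem.List.pyRange_neg_one_eq_nil (by omega)]
  simp

lemma seg_succ (n tl tr t : Int) (h : 0 < t) :
    seg n tl tr t = gSeg n tl tr (t - 1) ++ seg n tl tr (t - 1) := by
  unfold seg
  rw [PySem.List.pyRange_neg_one_cons (by omega), List.flatMap_cons]

-- inner for loop
lemma inner_fold {α : Type} :
    ∀ (l : List α) (t : Int) (acc : List Int),
      l.foldl (fun (s : Int × List Int) _ => (s.1 + 1, s.2 ++ [s.1 + 1])) (t, acc)
        = (t + l.length, acc ++ PySem.List.pyRange (t + 1) (t + l.length + 1) 1) := by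
  intro l
  induction l with
  | nil =>
      intro t acc
      simp
  | cons a l ih =>
      intro t acc
      rw [List.foldl_cons]
      simp only
      rw [ih]
      have hlen : (((a :: l).length : Int)) = (l.length : Int) + 1 := by
        push_cast [List.length_cons]; ring
      rw [hlen, PySem.List.pyRange_one_cons (by omega : t + 1 < t + ((l.length : Int) + 1) + 1)]
      rw [Prod.mk.injEq]
      refine ⟨by ring, ?_⟩
      have e : t + 1 + (l.length : Int) + 1 = t + ((l.length : Int) + 1) + 1 := by ring
      rw [e]
      simp

lemma schedJumpInner_eq (tl t : Int) (acc : List Int) (h : 0 < tl) :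
    schedJumpInner tl t acc = (t + tl, acc ++ upSeg tl t) := by
  unfold schedJumpInner upSeg
  rw [inner_fold, PySem.List.length_pyRange_one]
  have : ((tl - 0).toNat : Int) = tl := by omega
  rw [this]

-- initial dict
lemma getD_foldl_insert_const (v : Int) :
    ∀ (l : List Int) (d : PySem.Dict Int Int) (x : Int),
      (l.foldl (fun d j => d.insert j v) d).getD x 0
        = if x ∈ l then v else d.getD x 0 := by
  intro l
  induction l with
  | nil => simp
  | cons a l ih =>
      intro d x
      rw [List.foldl_cons, ih, PySem.Dict.getD_insert]
      by_cases hx : x ∈ l <;> by_cases hxa : x = a <;> simp [hx, hxa]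

lemma pyRange_neg_step_nil (b s : Int) (hs : s < 0) (hb : 0 ≤ b) :
    PySem.List.pyRange 0 b s = [] := by
  unfold PySem.List.pyRange
  rw [if_neg (by omega)]
  simp only
  rw [if_neg (by omega), if_neg (by omega)]
  simp

-- countdown range snoc
lemma pyRange_neg_one_snoc (a b : Int) (h : b ≤ a) :
    PySem.List.pyRange a (b - 1) (-1) = PySem.List.pyRange a b (-1) ++ [b] := by
  rw [PySem.List.pyRange_neg_one_eq_reverse, PySem.List.pyRange_neg_one_eq_reverse,
    show b - 1 + 1 = b by ring, PySem.List.pyRange_one_cons (by omega)]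
  simp

lemma downSeg_split (tl i : Int) (h : 0 < tl) :
    downSeg tl i = PySem.List.pyRange (i + tl - 1) i (-1) ++ [i] := by
  unfold downSeg
  rw [← pyRange_neg_one_snoc (i + tl - 1) i (by omega)]

lemma mid_not_cond (tl i x : Int) (htl : 0 < tl) (hmod : PySem.Int.mod i tl = 0)
    (h1 : i < x) (h2 : x < i + tl) : ¬ PySem.Int.mod x tl = 0 := by
  rw [PySem.Int.mod_eq_zero_iff_dvd] at hmod ⊢
  intro hx
  rcases Int.dvd_sub hx hmod with ⟨k, hk⟩
  have hk1 : 0 < k := by nlinarith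
  nlinarith

-- plain descent over entries the dict does not trigger on
lemma schedJumpLoop_desc (tl : Int) (d : PySem.Dict Int Int) :
    ∀ (m : Nat) (t : Int) (acc : List Int) (fuel : Nat),
      0 ≤ t - m → (∀ x : Int, t - m ≤ x → x < t → d.getD x 0 ≤ 0) →
      schedJumpLoop tl (fuel + m) t d acc
        = schedJumpLoop tl fuel (t - m) d (acc ++ PySem.List.pyRange (t - 1) (t - 1 - m) (-1)) := by
  intro m
  induction m with
  | zero =>
      intro t acc fuel _ _
      rw [PySem.List.pyRange_neg_one_eq_nil (by omega)]
      norm_num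
  | succ m ih =>
      intro t acc fuel h0 hd
      have ht1 : (1 : Int) ≤ t := by push_cast at h0; omega
      rw [show fuel + (m + 1) = (fuel + m) + 1 by ring]
      rw [schedJumpLoop, if_pos ht1]
      simp only
      rw [if_neg (by
        have := hd (t - 1) (by push_cast; push_cast at h0; omega) (by omega)
        omega)]
      rw [ih (t - 1) (acc ++ [t - 1]) fuel (by push_cast; push_cast at h0; omega)
        (fun x hx1 hx2 => hd x (by push_cast; push_cast at hx1; omega) (by omega))]
      have e1 : t - 1 - (m : Int) = t - ((m : Nat) + 1 : Nat) := by push_cast; omega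
      have e2 : PySem.List.pyRange (t - 1) (t - 1 - ((m : Nat) + 1 : Nat)) (-1)
          = (t - 1) :: PySem.List.pyRange (t - 1 - 1) (t - 1 - 1 - (m : Int)) (-1) := by
        have e3 : t - 1 - ((m : Nat) + 1 : Nat) = t - 1 - 1 - (m : Int) := by
          push_cast; ring
        rw [e3, PySem.List.pyRange_neg_one_cons (by omega)]
      rw [← e1, e2]
      simp

-- the bounce phase at boundary i, with c pending repeats
lemma schedJumpLoop_bounce (n tl tr : Int) (i : Int) (hi : 0 ≤ i) (htl : 0 < tl)
    (hmod : PySem.Int.mod i tl = 0) (hlt : i < n - tl)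
    (K : ∀ (d : PySem.Dict Int Int) (acc : List Int) (fuel : Nat),
        GInvD n tl d → InvD n tl tr d i →
        i.toNat * (1 + tl.toNat * (tr - 1).toNat) ≤ fuel →
        schedJumpLoop tl fuel i d acc = acc ++ seg n tl tr i) :
    ∀ (c : Nat) (d : PySem.Dict Int Int) (acc : List Int) (fuel : Nat),
      GInvD n tl d → InvD n tl tr d i → d.getD i 0 = (c : Int) →
      (c + 1) * tl.toNat + i.toNat * (1 + tl.toNat * (tr - 1).toNat) ≤ fuel →
      schedJumpLoop tl fuel (i + tl) d acc
        = acc ++ downSeg tl i ++ (List.replicate c (upSeg tl i ++ downSeg tl i)).flatten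
            ++ seg n tl tr i := by
  intro c
  induction c with
  | zero =>
      intro d acc fuel hG hI hc hfuel
      have hm : (((tl - 1).toNat : Nat) : Int) = tl - 1 := by omega
      have hmn : (tl - 1).toNat + 1 = tl.toNat := by omega
      have hfl : (tl - 1).toNat + 1 ≤ fuel := by
        have := hfuel; omega
      rw [show fuel = (fuel - (tl - 1).toNat) + (tl - 1).toNat by omega,
        schedJumpLoop_desc tl d (tl - 1).toNat (i + tl) acc (fuel - (tl - 1).toNat)
          (by rw [hm]; omega)
          (fun x hx1 hx2 => by
            rw [hm] at hx1
            rw [hG x (fun hcond =>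
              mid_not_cond tl i x htl hmod (by omega) (by omega) hcond.2.1)])]
      rw [show i + tl - ((tl - 1).toNat : Int) = i + 1 by rw [hm]; ring,
        show i + tl - 1 - ((tl - 1).toNat : Int) = i by rw [hm]; ring]
      rw [show fuel - (tl - 1).toNat = (fuel - (tl - 1).toNat - 1) + 1 by omega,
        schedJumpLoop, if_pos (by omega : (1 : Int) ≤ i + 1)]
      simp only [show i + 1 - 1 = i by ring]
      rw [if_neg (by rw [hc]; norm_num)]
      rw [K d (acc ++ PySem.List.pyRange (i + tl - 1) i (-1) ++ [i])
        (fuel - (tl - 1).toNat - 1) hG hI (by omega)]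
      rw [downSeg_split tl i htl]
      simp
  | succ c ih =>
      intro d acc fuel hG hI hc hfuel
      have hm : (((tl - 1).toNat : Nat) : Int) = tl - 1 := by omega
      have hmn : (tl - 1).toNat + 1 = tl.toNat := by omega
      have hfl : (tl - 1).toNat + 1 ≤ fuel := by
        have h1 : 1 * tl.toNat ≤ (c + 1 + 1) * tl.toNat := by
          apply Nat.mul_le_mul_right; omega
        omega
      rw [show fuel = (fuel - (tl - 1).toNat) + (tl - 1).toNat by omega,
        schedJumpLoop_desc tl d (tl - 1).toNat (i + tl) acc (fuel - (tl - 1).toNat)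
          (by rw [hm]; omega)
          (fun x hx1 hx2 => by
            rw [hm] at hx1
            rw [hG x (fun hcond =>
              mid_not_cond tl i x htl hmod (by omega) (by omega) hcond.2.1)])]
      rw [show i + tl - ((tl - 1).toNat : Int) = i + 1 by rw [hm]; ring,
        show i + tl - 1 - ((tl - 1).toNat : Int) = i by rw [hm]; ring]
      rw [show fuel - (tl - 1).toNat = (fuel - (tl - 1).toNat - 1) + 1 by omega,
        schedJumpLoop, if_pos (by omega : (1 : Int) ≤ i + 1)]
      simp only [show i + 1 - 1 = i by ring]
      rw [if_pos (by rw [hc]; positivity)]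
      rw [schedJumpInner_eq tl i _ htl]
      simp only
      rw [ih (d.insert i (d.getD i 0 - 1))
        (acc ++ PySem.List.pyRange (i + tl - 1) i (-1) ++ [i] ++ upSeg tl i)
        (fuel - (tl - 1).toNat - 1)
        (fun x hx => by
          rw [PySem.Dict.getD_insert]
          rw [if_neg (fun hxi => hx (by rw [hxi]; exact ⟨htl, hmod, hi, hlt⟩)), hG x hx])
        (fun x hx0 hxi => by
          rw [PySem.Dict.getD_insert, if_neg (by omega), hI x hx0 hxi])
        (by rw [PySem.Dict.getD_insert, if_pos rfl, hc]; push_cast; ring)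
        (by
          have h2 : (c + 1) * tl.toNat + (tl - 1).toNat + 1 ≤ (c + 1 + 1) * tl.toNat := by
            have : (c + 1 + 1) * tl.toNat = (c + 1) * tl.toNat + tl.toNat := by ring
            omega
          omega)]
      rw [downSeg_split tl i htl, List.replicate_succ, List.flatten_cons]
      simp


-- the main loop invariant
lemma schedJumpLoop_main (n tl tr : Int) :
    ∀ (k : Nat) (d : PySem.Dict Int Int) (acc : List Int) (fuel : Nat),
      GInvD n tl d → InvD n tl tr d k →
      k * (1 + tl.toNat * (tr - 1).toNat) ≤ fuel →
      schedJumpLoop tl fuel (k : Int) d acc = acc ++ seg n tl tr (k : Int) := by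
  intro k
  induction k with
  | zero =>
      intro d acc fuel _ _ _
      rw [seg_nonpos n tl tr _ (by norm_num)]
      cases fuel with
      | zero => rw [schedJumpLoop]; simp
      | succ f => rw [schedJumpLoop, if_neg (by norm_num)]; simp
  | succ k ih =>
      intro d acc fuel hG hI hfuel
      have hWsplit : (k + 1) * (1 + tl.toNat * (tr - 1).toNat)
          = k * (1 + tl.toNat * (tr - 1).toNat) + (1 + tl.toNat * (tr - 1).toNat) := by
        ring
      have hf1 : k * (1 + tl.toNat * (tr - 1).toNat) + 1 ≤ fuel := by omega
      rw [show fuel = (fuel - 1) + 1 by omega, schedJumpLoop,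
        if_pos (by push_cast; omega : (1 : Int) ≤ ((k + 1 : Nat) : Int))]
      simp only [show (((k + 1 : Nat) : Int)) - 1 = (k : Int) by push_cast; ring]
      have hgd := hI (k : Int) (by positivity) (by push_cast; omega)
      by_cases hcond : 0 < tl ∧ PySem.Int.mod (k : Int) tl = 0 ∧ (k : Int) < n - tl
      · rw [if_pos hcond] at hgd
        by_cases htr : 0 < tr - 1
        · rw [if_pos (by rw [hgd]; exact htr)]
          rw [schedJumpInner_eq tl _ _ hcond.1]
          simp only
          rw [schedJumpLoop_bounce n tl tr (k : Int) (by positivity) hcond.1 hcond.2.1 hcond.2.2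
            (fun d' acc' fuel' hG' hI' hf' => ih d' acc' fuel' hG' hI' (by simpa using hf'))
            (tr - 2).toNat (d.insert (k : Int) (d.getD (k : Int) 0 - 1))
            (acc ++ [(k : Int)] ++ upSeg tl (k : Int)) (fuel - 1)
            (fun x hx => by
              rw [PySem.Dict.getD_insert,
                if_neg (fun hxi => hx (by
                  rw [hxi]; exact ⟨hcond.1, hcond.2.1, by positivity, hcond.2.2⟩)),
                hG x hx])
            (fun x hx0 hxk => by
              rw [PySem.Dict.getD_insert, if_neg (by omega),
                hI x hx0 (by push_cast; omega)])
            (by rw [PySem.Dict.getD_insert, if_pos rfl, hgd]; omega)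
            (by
              have hknat : ((k : Int)).toNat = k := by simp
              have h2 : ((tr - 2).toNat + 1) * tl.toNat = tl.toNat * (tr - 1).toNat := by
                have h3 : (tr - 2).toNat + 1 = (tr - 1).toNat := by omega
                rw [h3]; ring
              rw [hknat, h2]
              omega)]
          rw [seg_succ n tl tr (((k + 1 : Nat)) : Int) (by push_cast; omega),
            show (((k + 1 : Nat) : Int)) - 1 = (k : Int) by push_cast; ring]
          unfold gSeg
          rw [if_pos hcond]
          unfold bounceSeg
          rw [show (tr - 1).toNat = (tr - 2).toNat + 1 by omega,
            List.replicate_succ, List.flatten_cons]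
          simp
        · rw [if_neg (by rw [hgd]; omega)]
          rw [ih d (acc ++ [(k : Int)]) (fuel - 1) hG
            (fun x hx0 hxk => hI x hx0 (by omega)) (by omega)]
          rw [seg_succ n tl tr (((k + 1 : Nat)) : Int) (by push_cast; omega),
            show (((k + 1 : Nat) : Int)) - 1 = (k : Int) by push_cast; ring]
          unfold gSeg
          rw [if_pos hcond]
          unfold bounceSeg
          rw [show (tr - 1).toNat = 0 by omega]
          simp
      · rw [if_neg hcond] at hgd
        rw [if_neg (by rw [hgd]; norm_num)]
        rw [ih d (acc ++ [(k : Int)]) (fuel - 1) hG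
          (fun x hx0 hxk => hI x hx0 (by omega)) (by omega)]
        rw [seg_succ n tl tr (((k + 1 : Nat)) : Int) (by push_cast; omega),
          show (((k + 1 : Nat) : Int)) - 1 = (k : Int) by push_cast; ring]
        unfold gSeg
        rw [if_neg hcond]
        simp

-- ===== VERDICT (by name: the statement is the Claim_ definition above) =====
theorem schedule_jump_py_spec : Claim_equal_schedule_jump_py := by
  intro n tl tr _ hpre
  obtain ⟨hn, htl⟩ := hpre
  unfold Spec_schedule_jump_py
  rw [alt_eq_seg]
  unfold schedule_jump_py
  simp only
  have hJ : ∀ x : Int,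
      ((PySem.List.pyRange 0 (n - tl) tl).foldl
          (fun d j => d.insert j (tr - 1)) PySem.Dict.empty).getD x 0
        = if x ∈ PySem.List.pyRange 0 (n - tl) tl then tr - 1 else 0 := by
    intro x
    rw [getD_foldl_insert_const]
    by_cases hx : x ∈ PySem.List.pyRange 0 (n - tl) tl <;> simp [hx]
  have hmemc : ∀ x : Int,
      (x ∈ PySem.List.pyRange 0 (n - tl) tl)
        ↔ (0 < tl ∧ PySem.Int.mod x tl = 0 ∧ 0 ≤ x ∧ x < n - tl) := by
    intro x
    rcases lt_or_gt_of_ne htl with hneg | hpos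
    · rw [pyRange_neg_step_nil (n - tl) tl hneg (by omega)]
      simp
      omega
    · rw [PySem.List.mem_pyRange_iff_of_pos hpos, PySem.Int.mod_eq_zero_iff_dvd]
      constructor
      · rintro ⟨h1, h2, h3⟩
        exact ⟨hpos, by simpa using h3, h1, h2⟩
      · rintro ⟨_, h3, h1, h2⟩
        exact ⟨h1, h2, by simpa using h3⟩
  have hG : GInvD n tl ((PySem.List.pyRange 0 (n - tl) tl).foldl
      (fun d j => d.insert j (tr - 1)) PySem.Dict.empty) := by
    intro x hx
    rw [hJ, if_neg (fun hm => hx ((hmemc x).mp hm))]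
  have hI : InvD n tl tr ((PySem.List.pyRange 0 (n - tl) tl).foldl
      (fun d j => d.insert j (tr - 1)) PySem.Dict.empty) ((n.toNat : Nat) : Int) := by
    intro x hx0 _
    rw [hJ]
    by_cases hc : 0 < tl ∧ PySem.Int.mod x tl = 0 ∧ x < n - tl
    · rw [if_pos hc, if_pos ((hmemc x).mpr ⟨hc.1, hc.2.1, hx0, hc.2.2⟩)]
    · rw [if_neg hc, if_neg (fun hm => hc (by
        obtain ⟨a, b, _, cc⟩ := (hmemc x).mp hm
        exact ⟨a, b, cc⟩))]
  have hmain := schedJumpLoop_main n tl tr n.toNat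
    ((PySem.List.pyRange 0 (n - tl) tl).foldl
      (fun d j => d.insert j (tr - 1)) PySem.Dict.empty) []
    (n.toNat * (1 + tl.toNat * (tr - 1).toNat) + 1) hG hI (by omega)
  rw [show ((n.toNat : Nat) : Int) = n by omega] at hmain
  rw [hmain]
  simp
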